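-- pv_equiv track=rewrite | github.com/Soleil79/HelloPython | lesson5/seminare_task2.py | range_nums
-- ===== SOURCE A (Python) =====
-- def range_nums (new_list: list):
--     my_list = []
--     for i in range(len(new_list)):
--         f = new_list[i]
--         lis_1 = [f]
--         for j in range(i + 1, len(new_list)):
--             if new_list[j] > f:
--                 f = new_list[j]
--                 lis_1.append(f)
--         if len(lis_1) > 1:
--             my_list.append(lis_1)
--     return my_list
-- ===== SOURCE B (Python) =====
-- def range_nums(new_list: list):
--     # Right-to-left monotonic stack: stack holds (value, greedy chain starting
--     # at that value); the chain for position i is new_list[i] prepended to the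
--     # chain of its next strictly-greater element.
--     stack = []
--     chains = []
--     for x in reversed(new_list):
--         while stack and stack[-1][0] <= x:
--             stack.pop()
--         chain = [x] + (stack[-1][1] if stack else [])
--         stack.append((x, chain))
--         chains.append(chain)
--     chains.reverse()
--     return [c for c in chains if len(c) > 1]
-- ===== Notes on version B (the rewrite author's own statement) =====
-- stated objective: alternative
-- what changed: Replaces A's per-start-index rescan of the whole tail with one right-to-left monotonic-stack pass that finds each position's next strictly greater element and shares chain suffixes (chain(i) = a[i] prepended to chain(next-greater(i))); O(n + output size) work instead of O(n^2) scanning, though on the sorted worst case the output itself is quadratic.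
import Mathlib
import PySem

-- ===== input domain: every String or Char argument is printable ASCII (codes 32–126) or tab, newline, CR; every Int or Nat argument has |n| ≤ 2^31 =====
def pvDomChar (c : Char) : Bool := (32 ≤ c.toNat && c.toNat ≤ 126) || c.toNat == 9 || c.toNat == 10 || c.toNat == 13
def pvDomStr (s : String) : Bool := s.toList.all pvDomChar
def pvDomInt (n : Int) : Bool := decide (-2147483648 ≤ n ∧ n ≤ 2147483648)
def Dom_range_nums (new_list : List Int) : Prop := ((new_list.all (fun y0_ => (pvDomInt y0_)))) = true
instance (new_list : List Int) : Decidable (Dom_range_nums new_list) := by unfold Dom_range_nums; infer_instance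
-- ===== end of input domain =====

-- B replaces A's per-start rescans with one right-to-left monotonic-stack pass that shares
-- chain suffixes (objective: alternative).

-- ===== PORT A =====
def range_nums (new_list : List Int) : List (List Int) :=
  (PySem.List.pyRange 0 (new_list.length : Int) 1).foldl
    (fun my_list i =>
      let f := PySem.List.pyGetD new_list i 0
      let r := (PySem.List.pyRange (i + 1) (new_list.length : Int) 1).foldl
          (fun (s : Int × List Int) j =>
            if s.1 < PySem.List.pyGetD new_list j 0 then
              (PySem.List.pyGetD new_list j 0, s.2 ++ [PySem.List.pyGetD new_list j 0])
            else s)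
          (f, [f])
      if 1 < r.2.length then my_list ++ [r.2] else my_list)
    []

-- ===== PORT B =====
-- the 'while stack and stack[-1][0] <= x: stack.pop()' loop (stack top = head)
def pvPopLE (x : Int) : List (Int × List Int) → List (Int × List Int)
  | [] => []
  | (v, c) :: rest => if v ≤ x then pvPopLE x rest else (v, c) :: rest

def range_nums_alt (new_list : List Int) : List (List Int) :=
  let r := new_list.reverse.foldl
    (fun (st : List (Int × List Int) × List (List Int)) x =>
      let stack := pvPopLE x st.1
      let chain := x :: (match stack with | [] => [] | (_, c) :: _ => c)
      ((x, chain) :: stack, st.2 ++ [chain]))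
    ([], [])
  r.2.reverse.filter (fun c => 1 < c.length)

-- ===== PRECONDITION & SPEC =====
def Spec_range_nums (new_list : List Int) (out : List (List Int)) : Prop := out = range_nums_alt new_list
instance (new_list : List Int) (out : List (List Int)) : Decidable (Spec_range_nums new_list out) := by unfold Spec_range_nums; infer_instance

-- ===== CLAIM (what is proved, stated in full; the proofs are below) =====
def Claim_equal_range_nums : Prop := ∀ (new_list : List Int), Dom_range_nums new_list → Spec_range_nums new_list (range_nums new_list)

-- ===== LEMMAS AND PROOFS =====

-- the tail of the greedy strictly-increasing chain, current max f
def tailChain (f : Int) : List Int → List Int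
  | [] => []
  | x :: xs => if f < x then x :: tailChain x xs else tailChain f xs

-- the greedy chain of each suffix, in order
def specChains : List Int → List (List Int)
  | [] => []
  | x :: xs => (x :: tailChain x xs) :: specChains xs

def dropLE (x : Int) : List Int → List Int
  | [] => []
  | y :: ys => if y ≤ x then dropLE x ys else y :: ys

theorem dropLE_length (x : Int) (l : List Int) : (dropLE x l).length ≤ l.length := by
  induction l with
  | nil => simp [dropLE]
  | cons y ys ih =>
    simp only [dropLE]
    split
    · simp; omega
    · simp

-- the stack after processing a suffix: one entry per greedy-chain position
def stackOf : List Int → List (Int × List Int)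
  | [] => []
  | x :: xs => (x, x :: tailChain x xs) :: stackOf (dropLE x xs)
termination_by l => l.length
decreasing_by
  simpa using Nat.lt_succ_of_le (dropLE_length x xs)

def chainHead : List Int → List Int
  | [] => []
  | y :: ys => y :: tailChain y ys

theorem tailChain_eq_chainHead_dropLE (x : Int) (xs : List Int) :
    tailChain x xs = chainHead (dropLE x xs) := by
  induction xs generalizing x with
  | nil => rfl
  | cons y ys ih =>
    by_cases h : y ≤ x
    · have hx : ¬ x < y := by omega
      simp [tailChain, dropLE, h, hx, ih]
    · have hx : x < y := by omega
      simp [tailChain, dropLE, h, hx, chainHead]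

theorem dropLE_dropLE (x y : Int) (h : y ≤ x) (l : List Int) :
    dropLE x (dropLE y l) = dropLE x l := by
  induction l with
  | nil => rfl
  | cons z zs ih =>
    by_cases hz : z ≤ y
    · have hzx : z ≤ x := le_trans hz h
      simp [dropLE, hz, hzx, ih]
    · simp [dropLE, hz]

theorem popLE_stackOf (x : Int) (l : List Int) :
    pvPopLE x (stackOf l) = stackOf (dropLE x l) := by
  induction l using stackOf.induct with
  | case1 => simp [stackOf, pvPopLE, dropLE]
  | case2 y ys ih =>
    by_cases h : y ≤ x
    · rw [stackOf]
      simp only [pvPopLE, h, if_pos]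
      rw [ih, dropLE_dropLE x y h]
      simp [dropLE, h]
    · rw [stackOf]
      simp only [pvPopLE, h, dropLE, ite_false]
      conv_rhs => rw [stackOf]

theorem chainHead_stackOf (l : List Int) :
    (match stackOf l with | [] => ([] : List Int) | (_, c) :: _ => c) = chainHead l := by
  cases l with
  | nil => simp [stackOf, chainHead]
  | cons y ys => rw [stackOf]; rfl

-- B's fold invariant
theorem foldB (l : List Int) :
    l.reverse.foldl
      (fun (st : List (Int × List Int) × List (List Int)) x =>
        let stack := pvPopLE x st.1
        let chain := x :: (match stack with | [] => [] | (_, c) :: _ => c)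
        ((x, chain) :: stack, st.2 ++ [chain]))
      ([], []) = (stackOf l, (specChains l).reverse) := by
  induction l with
  | nil => simp [stackOf, specChains]
  | cons x xs ih =>
    rw [List.reverse_cons, List.foldl_append, ih]
    simp only [List.foldl_cons, List.foldl_nil]
    rw [popLE_stackOf, chainHead_stackOf, ← tailChain_eq_chainHead_dropLE]
    rw [stackOf, specChains, List.reverse_cons]

theorem range_nums_alt_eq (l : List Int) :
    range_nums_alt l = (specChains l).filter (fun c => 1 < c.length) := by
  unfold range_nums_alt
  rw [foldB]
  simp

-- A side ----------------------------------------------------------------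

-- the inner loop of A, named for the rewrites below (definitionally A's inner foldl)
def innerFold (l : List Int) (i : Int) : Int × List Int :=
  (PySem.List.pyRange (i + 1) (l.length : Int) 1).foldl
    (fun (s : Int × List Int) j =>
      if s.1 < PySem.List.pyGetD l j 0 then
        (PySem.List.pyGetD l j 0, s.2 ++ [PySem.List.pyGetD l j 0])
      else s)
    (PySem.List.pyGetD l i 0, [PySem.List.pyGetD l i 0])

theorem inner_fold (xs : List Int) (f : Int) (acc : List Int) :
    (xs.foldl (fun (s : Int × List Int) x => if s.1 < x then (x, s.2 ++ [x]) else s)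
      (f, acc)).2 = acc ++ tailChain f xs := by
  induction xs generalizing f acc with
  | nil => simp [tailChain]
  | cons x xs ih =>
    by_cases h : f < x
    · simp [tailChain, h, ih]
    · simp [tailChain, h, ih]

def chainA (l : List Int) (i : Int) : List Int :=
  (PySem.List.pyGetD l i 0) :: tailChain (PySem.List.pyGetD l i 0) (l.drop (i + 1).toNat)

theorem innerFold_snd (l : List Int) (i : Int) (h : 0 ≤ i) :
    (innerFold l i).2 = chainA l i := by
  unfold innerFold
  rw [PySem.List.foldl_pyRange_pyGetD' l 0
      (fun (s : Int × List Int) x => if s.1 < x then (x, s.2 ++ [x]) else s) _ (by omega)]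
  rw [inner_fold]
  rfl

theorem chainA_natCast (l : List Int) (k : Nat) :
    chainA l (k : Int) = (l.getD k 0) :: tailChain (l.getD k 0) (l.drop (k + 1)) := by
  unfold chainA
  rw [PySem.List.pyGetD_natCast]
  congr 2 <;> omega

theorem map_chainA_range (l : List Int) :
    (List.range l.length).map (fun k : Nat => chainA l (k : Int)) = specChains l := by
  induction l with
  | nil => rfl
  | cons x xs ih =>
    rw [List.length_cons, List.range_succ_eq_map, List.map_cons, List.map_map]
    rw [specChains, ← ih]
    rw [chainA_natCast]
    simp only [List.getD_cons_zero, List.drop_succ_cons, List.drop_zero]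
    congr 1
    apply List.map_congr_left
    intro k _
    simp only [Function.comp_apply]
    rw [show ((Nat.succ k : Nat) : Int) = ((k + 1 : Nat) : Int) from rfl, chainA_natCast,
        chainA_natCast]
    rfl

theorem range_nums_eq (l : List Int) :
    range_nums l = (specChains l).filter (fun c => 1 < c.length) := by
  show (PySem.List.pyRange 0 (l.length : Int) 1).foldl
      (fun my_list i => if 1 < (innerFold l i).2.length then my_list ++ [(innerFold l i).2]
        else my_list) [] = _
  have hbody : ∀ (acc : List (List Int)) (i : Int), i ∈ PySem.List.pyRange 0 (l.length : Int) 1 →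
      (fun my_list i => if 1 < (innerFold l i).2.length then my_list ++ [(innerFold l i).2]
        else my_list) acc i
      = (fun my_list i => if 1 < (chainA l i).length then my_list ++ [chainA l i] else my_list)
          acc i := by
    intro acc i hi
    have h0 : 0 ≤ i := ((PySem.List.mem_pyRange_one).1 hi).1
    simp only [innerFold_snd l i h0]
  rw [PySem.List.foldl_congr_mem _ _ _ _ hbody]
  rw [PySem.List.foldl_append_ite (p := fun i => 1 < (chainA l i).length)
      (f := fun i => chainA l i)]
  rw [List.nil_append]
  have hr : PySem.List.pyRange 0 (l.length : Int) 1
      = (List.range l.length).map (fun k : Nat => (k : Int)) := by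
    rw [PySem.List.pyRange_one]
    simp
  rw [hr, List.filter_map, List.map_map, ← map_chainA_range l, List.filter_map]
  rfl

-- ===== VERDICT (by name: the statement is the Claim_ definition above) =====
theorem range_nums_spec : Claim_equal_range_nums := by
  intro l _
  unfold Spec_range_nums
  rw [range_nums_eq, range_nums_alt_eq]
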